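-- pv_equiv track=rewrite | github.com/benediktwerner/AdventOfCode | day05/sol.py | retract
-- ===== SOURCE A (Python) =====
-- def retract(poly, exclude=None):
--     poly = (ord(c) for c in poly if c != exclude and c.lower() != exclude)
--     stack = []
--
--     for c in poly:
--         if stack and abs(stack[-1] - c) == 32:
--             stack.pop()
--         else:
--             stack.append(c)
--
--     return len(stack)
-- ===== SOURCE B (Python) =====
-- def retract(poly, exclude=None):
--     s = [ord(c) for c in poly if c != exclude and c.lower() != exclude]
--     while True:
--         i = next((j for j in range(len(s) - 1) if abs(s[j] - s[j + 1]) == 32), None)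
--         if i is None:
--             return len(s)
--         del s[i:i + 2]
-- ===== Notes on version B (the rewrite author's own statement) =====
-- stated objective: alternative
-- what changed: Replaces the one-pass stack reduction with a fixpoint loop that repeatedly deletes the first adjacent reacting pair until none remains.
import Mathlib
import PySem

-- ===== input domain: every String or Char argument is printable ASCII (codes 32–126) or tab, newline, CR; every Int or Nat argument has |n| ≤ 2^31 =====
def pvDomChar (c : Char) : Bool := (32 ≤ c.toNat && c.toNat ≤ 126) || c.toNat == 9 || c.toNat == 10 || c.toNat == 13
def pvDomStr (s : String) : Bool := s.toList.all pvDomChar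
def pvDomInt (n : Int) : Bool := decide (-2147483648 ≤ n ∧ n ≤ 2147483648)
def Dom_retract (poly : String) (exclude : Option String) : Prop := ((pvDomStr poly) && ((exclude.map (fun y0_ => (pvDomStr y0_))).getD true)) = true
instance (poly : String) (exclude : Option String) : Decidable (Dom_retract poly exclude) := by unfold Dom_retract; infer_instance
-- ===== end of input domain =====

-- B replaces A's one-pass stack by a repeated-scan-to-fixpoint deletion of the first
-- reacting adjacent pair; same exact result (alternative decomposition, not faster).

-- ===== PORT A =====
-- the filter 'if c != exclude and c.lower() != exclude' (identical line in both Pythons)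
def pvKeep (c : Char) (exclude : Option String) : Bool :=
  match exclude with
  | none => true
  | some e => !(String.mk [c] == e) && !(PySem.Str.lower (String.mk [c]) == e)

-- one iteration of A's for-loop body; stack top at the head
def pvStep (stack : List Int) (c : Int) : List Int :=
  match stack with
  | [] => c :: []
  | t :: rest => if (t - c).natAbs = 32 then rest else c :: t :: rest

def retract (poly : String) (exclude : Option String) : Int :=
  let cs := (poly.toList.filter (fun c => pvKeep c exclude)).map (fun c => (c.toNat : Int))
  ((cs.foldl pvStep []).length : Int)

-- ===== PORT B =====
-- index of the first adjacent reacting pair, as in B's 'next(... range(len(s)-1) ...)'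
def pvFindPair : List Int → Option Nat
  | x :: y :: rest => if (x - y).natAbs = 32 then some 0 else (pvFindPair (y :: rest)).map (· + 1)
  | _ => none

-- termination helper for pvReduce (cited in decreasing_by)
theorem pvFindPair_le (s : List Int) (i : Nat) (h : pvFindPair s = some i) : i + 2 ≤ s.length := by
  induction s generalizing i with
  | nil => simp [pvFindPair] at h
  | cons x xs ih =>
    match xs, h with
    | [], h => simp [pvFindPair] at h
    | y :: rest, h =>
      rw [pvFindPair] at h
      split at h
      · cases h; simp
      · rcases Option.map_eq_some_iff.mp h with ⟨j, hj, rfl⟩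
        have := ih j hj
        simpa using Nat.succ_le_succ this

-- B's while-loop: delete s[i:i+2] for the first reacting pair i, until none remains
def pvReduce (s : List Int) : List Int :=
  match h : pvFindPair s with
  | none => s
  | some i => pvReduce (s.take i ++ s.drop (i + 2))
termination_by s.length
decreasing_by
  have := pvFindPair_le s i h
  simp [List.length_take, List.length_drop]
  omega

def retract_alt (poly : String) (exclude : Option String) : Int :=
  let s := (poly.toList.filter (fun c => pvKeep c exclude)).map (fun c => (c.toNat : Int))
  ((pvReduce s).length : Int)

-- ===== PRECONDITION & SPEC =====
def Spec_retract (poly : String) (exclude : Option String) (out : Int) : Prop := out = retract_alt poly exclude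
instance (poly : String) (exclude : Option String) (out : Int) : Decidable (Spec_retract poly exclude out) := by unfold Spec_retract; infer_instance

-- ===== CLAIM (what is proved, stated in full; the proofs are below) =====
def Claim_equal_retract : Prop := ∀ (poly : String) (exclude : Option String), Dom_retract poly exclude → Spec_retract poly exclude (retract poly exclude)

-- ===== LEMMAS AND PROOFS =====

-- head-compatibility: the stack top does not react with the next input char
def pvCompat (st s : List Int) : Prop :=
  ∀ t x, st.head? = some t → s.head? = some x → (t - x).natAbs ≠ 32

-- on a pair-free word the stack algorithm just reverses the word onto the stack
theorem pvFoldl_none (s : List Int) : ∀ st, pvFindPair s = none → pvCompat st s →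
    s.foldl pvStep st = s.reverse ++ st := by
  induction s with
  | nil => intro st _ _; simp
  | cons x xs ih =>
    intro st hn hc
    have hstep : pvStep st x = x :: st := by
      cases st with
      | nil => rfl
      | cons t r =>
        have := hc t x rfl rfl
        simp [pvStep, this]
    have hxs : pvFindPair xs = none ∧ pvCompat (x :: st) xs := by
      cases xs with
      | nil => exact ⟨rfl, by intro t y _ hy; simp at hy⟩
      | cons y rest =>
        rw [pvFindPair] at hn
        split at hn
        · cases hn
        · refine ⟨by simpa using hn, ?_⟩
          intro t z ht hz
          simp at ht hz
          subst ht; subst hz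
          assumption
    have := ih (x :: st) hxs.1 hxs.2
    simp [List.foldl_cons, hstep, this]

-- deleting the first reacting pair does not change the final stack
theorem pvFoldl_some (s : List Int) : ∀ st i, pvFindPair s = some i → pvCompat st s →
    s.foldl pvStep st = (s.take i ++ s.drop (i + 2)).foldl pvStep st := by
  induction s with
  | nil => intro st i h _; simp [pvFindPair] at h
  | cons x xs ih =>
    intro st i h hc
    have hstep : pvStep st x = x :: st := by
      cases st with
      | nil => rfl
      | cons t r =>
        have := hc t x rfl rfl
        simp [pvStep, this]
    match xs, h with
    | [], h => simp [pvFindPair] at h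
    | y :: rest, h =>
      rw [pvFindPair] at h
      split at h
      · -- react x y : the pair is (x, y) at position 0
        cases h
        have hr : (x - y).natAbs = 32 := by assumption
        have h2 : pvStep (x :: st) y = st := by simp [pvStep, hr]
        simp [List.foldl_cons, hstep, h2]
      · rcases Option.map_eq_some_iff.mp h with ⟨j, hj, rfl⟩
        have hxy : ¬ (x - y).natAbs = 32 := by assumption
        have hc' : pvCompat (x :: st) (y :: rest) := by
          intro t z ht hz
          simp at ht hz
          subst ht; subst hz
          exact hxy
        have := ih (x :: st) j hj hc'
        simp only [List.foldl_cons, hstep] at this ⊢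
        rw [this]
        simp [List.take_succ_cons, List.drop_succ_cons, List.foldl_cons, hstep]

-- the fixpoint reduction and the stack reduction have the same final length
theorem pvMain (s : List Int) : (s.foldl pvStep []).length = (pvReduce s).length := by
  rw [pvReduce]
  split
  · next h =>
    rw [pvFoldl_none s [] h (by intro t x ht _; simp at ht)]
    simp
  · next i h =>
    rw [pvFoldl_some s [] i h (by intro t x ht _; simp at ht)]
    have hlt : (s.take i ++ s.drop (i + 2)).length < s.length := by
      have := pvFindPair_le s i h
      simp [List.length_take, List.length_drop]
      omega
    exact pvMain (s.take i ++ s.drop (i + 2))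
termination_by s.length
decreasing_by
  exact hlt

-- ===== VERDICT (by name: the statement is the Claim_ definition above) =====
theorem retract_spec : Claim_equal_retract := by
  intro poly exclude _
  unfold Spec_retract retract retract_alt
  simp only [pvMain]
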